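-- pv_equiv track=rewrite | github.com/zehranuracikgoz/max_pair_sum_comparison | brute_force.py | find_max_sum_indices
-- ===== SOURCE A (Python) =====
-- def find_max_sum_indices(arr):
--     max_sum = 0
--     index1, index2 = 0, 0
--
--
--     for i in range(len(arr) - 1):
--         for j in range(i + 1, len(arr)):
--             current_sum = arr[i] + arr[j]
--             if current_sum > max_sum:
--                 max_sum = current_sum
--                 index1, index2 = i, j
--
--     return index1, index2, max_sum
-- ===== SOURCE B (Python) =====
-- def find_max_sum_indices(arr):
--     index1, index2, max_sum = 0, 0, 0
--     if arr:
--         best_val, best_idx = arr[0], 0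
--         for j in range(1, len(arr)):
--             s = best_val + arr[j]
--             if s > max_sum:
--                 index1, index2, max_sum = best_idx, j, s
--             if arr[j] > best_val:
--                 best_val, best_idx = arr[j], j
--     return index1, index2, max_sum
-- ===== Notes on version B (the rewrite author's own statement) =====
-- stated objective: faster
-- what changed: Replaced the O(n^2) scan over all index pairs by a single left-to-right pass that maintains the running prefix maximum (value and its first index), so each position is paired only with the best earlier element.
import Mathlib
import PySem

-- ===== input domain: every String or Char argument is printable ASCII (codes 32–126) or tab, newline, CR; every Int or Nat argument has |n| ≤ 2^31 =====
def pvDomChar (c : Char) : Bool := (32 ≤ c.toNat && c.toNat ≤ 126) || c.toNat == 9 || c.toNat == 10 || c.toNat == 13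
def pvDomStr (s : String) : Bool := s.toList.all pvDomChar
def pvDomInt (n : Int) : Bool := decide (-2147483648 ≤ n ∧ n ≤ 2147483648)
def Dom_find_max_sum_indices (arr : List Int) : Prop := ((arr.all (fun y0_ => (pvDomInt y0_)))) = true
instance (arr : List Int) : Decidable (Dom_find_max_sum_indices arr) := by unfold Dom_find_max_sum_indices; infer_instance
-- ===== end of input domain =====

-- B replaces A's O(n^2) scan over all index pairs by one left-to-right pass that keeps the
-- running prefix maximum (value and its first index); proved to return exactly A's triple.

-- ===== PORT A =====
def find_max_sum_indices (arr : List Int) : Int × Int × Int :=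
  let n : Int := (arr.length : Int)
  let st :=
    (PySem.List.pyRange 0 (n - 1) 1).foldl (fun st i =>
      (PySem.List.pyRange (i + 1) n 1).foldl (fun st j =>
        let current_sum := PySem.List.pyGetD arr i 0 + PySem.List.pyGetD arr j 0
        if current_sum > st.1 then (current_sum, i, j) else st) st)
      ((0 : Int), (0 : Int), (0 : Int))
  (st.2.1, st.2.2, st.1)

-- ===== PORT B =====
-- state tuple = (index1, index2, max_sum, best_val, best_idx), exactly as in Source B
def find_max_sum_indices_alt (arr : List Int) : Int × Int × Int :=
  match arr with
  | [] => ((0 : Int), (0 : Int), (0 : Int))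
  | a0 :: t =>
    let n : Int := ((a0 :: t).length : Int)
    let st :=
      (PySem.List.pyRange 1 n 1).foldl (fun st j =>
        let aj := PySem.List.pyGetD (a0 :: t) j 0
        let s := st.2.2.2.1 + aj
        let st1 := if s > st.2.2.1 then (st.2.2.2.2, j, s, st.2.2.2.1, st.2.2.2.2) else st
        if aj > st1.2.2.2.1 then (st1.1, st1.2.1, st1.2.2.1, aj, j) else st1)
        ((0 : Int), (0 : Int), (0 : Int), a0, (0 : Int))
    (st.1, st.2.1, st.2.2.1)

-- ===== PRECONDITION & SPEC =====
def Spec_find_max_sum_indices (arr : List Int) (out : Int × Int × Int) : Prop := out = find_max_sum_indices_alt arr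
instance (arr : List Int) (out : Int × Int × Int) : Decidable (Spec_find_max_sum_indices arr out) := by unfold Spec_find_max_sum_indices; infer_instance

-- ===== CLAIM (what is proved, stated in full; the proofs are below) =====
def Claim_equal_find_max_sum_indices : Prop := ∀ (arr : List Int), Dom_find_max_sum_indices arr → Spec_find_max_sum_indices arr (find_max_sum_indices arr)

-- ===== LEMMAS AND PROOFS =====

-- value of a pair of positions
def pvVal (a : Nat → Int) (p : Nat × Nat) : Int := a p.1 + a p.2

-- the shared "record a strictly better pair" step, on state (max_sum, index1, index2)
def pvStep (a : Nat → Int) (st : Int × Int × Int) (p : Nat × Nat) : Int × Int × Int :=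
  if pvVal a p > st.1 then (pvVal a p, (p.1 : Int), (p.2 : Int)) else st

-- all pairs i < j < n in A's (lexicographic, i-major) order
def pvAlist (n : Nat) : List (Nat × Nat) :=
  (List.range (n - 1)).flatMap (fun i => (List.range (n - 1 - i)).map (fun m => (i, i + 1 + m)))

-- all pairs with second component ≤ k, in j-major order
def pvJpre (k : Nat) : List (Nat × Nat) :=
  (List.range k).flatMap (fun m => (List.range (m + 1)).map (fun i => (i, m + 1)))

-- prefix maximum of a over [0, k) (meaningful for k ≥ 1) and its first attaining index
def pvPM (a : Nat → Int) : Nat → Int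
  | 0 => a 0
  | k + 1 => if a k > pvPM a k then a k else pvPM a k

def pvFI (a : Nat → Int) : Nat → Nat
  | 0 => 0
  | k + 1 => if a k > pvPM a k then k else pvFI a k

-- B's one-pass step on state (index1, index2, max_sum, best_val, best_idx)
def pvBStep (a : Nat → Int) (st : Int × Int × Int × Int × Int) (j : Nat) : Int × Int × Int × Int × Int :=
  let s := st.2.2.2.1 + a j
  let st1 := if s > st.2.2.1 then (st.2.2.2.2, (j : Int), s, st.2.2.2.1, st.2.2.2.2) else st
  if a j > st1.2.2.2.1 then (st1.1, st1.2.1, st1.2.2.1, a j, (j : Int)) else st1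

def pvLex (p q : Nat × Nat) : Prop := p.1 < q.1 ∨ (p.1 = q.1 ∧ p.2 < q.2)
def pvRev (p q : Nat × Nat) : Prop := p.2 < q.2 ∨ (p.2 = q.2 ∧ p.1 < q.1)

lemma pvFoldlFlatMap {α β γ : Type} (l : List α) (g : α → List β) (f : γ → β → γ) (init : γ) :
    (l.flatMap g).foldl f init = l.foldl (fun st x => (g x).foldl f st) init := by
  induction l generalizing init with
  | nil => rfl
  | cons x xs ih => simp [List.flatMap_cons, List.foldl_append, ih]

lemma pvMemA (n : Nat) (p : Nat × Nat) : p ∈ pvAlist n ↔ p.1 < p.2 ∧ p.2 < n := by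
  simp only [pvAlist, List.mem_flatMap, List.mem_map, List.mem_range]
  constructor
  · rintro ⟨i, hi, m, hm, rfl⟩; simp; omega
  · rintro ⟨h1, h2⟩
    exact ⟨p.1, by omega, p.2 - p.1 - 1, by omega, by cases p with | mk x y => simp; omega⟩

lemma pvMemJ (k : Nat) (p : Nat × Nat) : p ∈ pvJpre k ↔ p.1 < p.2 ∧ p.2 ≤ k := by
  simp only [pvJpre, List.mem_flatMap, List.mem_map, List.mem_range]
  constructor
  · rintro ⟨m, hm, i, hi, rfl⟩; simp; omega
  · rintro ⟨h1, h2⟩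
    exact ⟨p.2 - 1, by omega, p.1, by omega, by cases p with | mk x y => simp; omega⟩

lemma pvPairwiseA (n : Nat) : (pvAlist n).Pairwise pvLex := by
  unfold pvAlist
  rw [List.flatMap_def, List.pairwise_flatten]
  constructor
  · intro l hl
    simp only [List.mem_map, List.mem_range] at hl
    obtain ⟨i, _, rfl⟩ := hl
    exact List.Pairwise.map _ (fun m m' h => Or.inr ⟨rfl, by omega⟩) List.pairwise_lt_range
  · rw [List.pairwise_map]
    refine List.Pairwise.imp ?_ (List.pairwise_lt_range)
    intro i i' h p hp q hq
    simp only [List.mem_map, List.mem_range] at hp hq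
    obtain ⟨m, _, rfl⟩ := hp; obtain ⟨m', _, rfl⟩ := hq
    exact Or.inl h

lemma pvPairwiseJ (k : Nat) : (pvJpre k).Pairwise pvRev := by
  unfold pvJpre
  rw [List.flatMap_def, List.pairwise_flatten]
  constructor
  · intro l hl
    simp only [List.mem_map, List.mem_range] at hl
    obtain ⟨m, _, rfl⟩ := hl
    exact List.Pairwise.map _ (fun i i' h => Or.inr ⟨rfl, by omega⟩) List.pairwise_lt_range
  · rw [List.pairwise_map]
    refine List.Pairwise.imp ?_ (List.pairwise_lt_range)
    intro m m' h p hp q hq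
    simp only [List.mem_map, List.mem_range] at hp hq
    obtain ⟨i, _, rfl⟩ := hp; obtain ⟨i', _, rfl⟩ := hq
    exact Or.inl (by omega)

-- exchange argument: the lex-first and the revlex-first maximum-sum pair coincide
lemma pvExchange (a : Nat → Int) (n i1 j1 i2 j2 : Nat)
    (h1 : i1 < j1) (h1n : j1 < n) (h2 : i2 < j2) (h2n : j2 < n)
    (hmax : ∀ i j : Nat, i < j → j < n → a i + a j ≤ a i1 + a j1)
    (hS : a i1 + a j1 = a i2 + a j2)
    (hlex : ∀ i j : Nat, i < j → j < n → a i + a j = a i1 + a j1 → (i1 < i ∨ (i1 = i ∧ j1 ≤ j)))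
    (hrev : ∀ i j : Nat, i < j → j < n → a i + a j = a i1 + a j1 → (j2 < j ∨ (j2 = j ∧ i2 ≤ i))) :
    i1 = i2 ∧ j1 = j2 := by
  have hA := hlex i2 j2 h2 h2n hS.symm
  have hB := hrev i1 j1 h1 h1n rfl
  rcases hA with hA | ⟨rfl, hA⟩
  · -- i1 < i2 : exchange the partners of i1 and i2
    have hij : i1 < j2 := by omega
    have hx : a i1 + a j2 ≤ a i1 + a j1 := hmax i1 j2 hij h2n
    have hy : a i2 + a j1 ≤ a i1 + a j1 := hmax i2 j1 (by omega) h1n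
    have hxe : a i1 + a j2 = a i1 + a j1 := by omega
    have := hlex i1 j2 hij h2n hxe
    omega
  · omega

-- characterization of a fold of pvStep: unchanged, or the first pair attaining the strict maximum
lemma pvFoldChar (a : Nat → Int) (L : List (Nat × Nat)) (st0 : Int × Int × Int) :
    (L.foldl (pvStep a) st0 = st0 ∧ ∀ p ∈ L, pvVal a p ≤ st0.1) ∨
    (∃ L1 p L2, L = L1 ++ p :: L2 ∧
      L.foldl (pvStep a) st0 = (pvVal a p, (p.1 : Int), (p.2 : Int)) ∧
      pvVal a p > st0.1 ∧ (∀ q ∈ L1, pvVal a q < pvVal a p) ∧ (∀ q ∈ L2, pvVal a q ≤ pvVal a p)) := by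
  induction L using List.reverseRecOn with
  | nil => exact Or.inl ⟨rfl, by simp⟩
  | append_singleton L x ih =>
    rw [List.foldl_append, List.foldl_cons, List.foldl_nil]
    rcases ih with ⟨he, hall⟩ | ⟨L1, p, L2, rfl, he, hgt, hlt, hle⟩
    · rw [he]
      by_cases hc : pvVal a x > st0.1
      · refine Or.inr ⟨L, x, [], by simp, by simp [pvStep, hc], hc,
          fun q hq => lt_of_le_of_lt (hall q hq) hc, by simp⟩
      · exact Or.inl ⟨by simp [pvStep, hc], by
          intro p hp
          rcases List.mem_append.1 hp with h | h
          · exact hall p h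
          · simp at h; subst h; omega⟩
    · rw [he]
      by_cases hc : pvVal a x > pvVal a p
      · refine Or.inr ⟨L1 ++ p :: L2, x, [],
          by simp, by simp only [pvStep]; rw [if_pos (by simpa using hc)], by omega, ?_, by simp⟩
        intro q hq
        rcases List.mem_append.1 hq with h | h
        · exact lt_trans (hlt q h) hc
        · rcases List.mem_cons.1 h with h | h
          · subst h; exact hc
          · exact lt_of_le_of_lt (hle q h) hc
      · refine Or.inr ⟨L1, p, L2 ++ [x],
          by simp, by simp only [pvStep]; rw [if_neg (by simpa using hc)], hgt, hlt, ?_⟩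
        intro q hq
        rcases List.mem_append.1 hq with h | h
        · exact hle q h
        · simp at h; subst h; omega

lemma pvDecompMax (a : Nat → Int) (L1 L2 : List (Nat × Nat)) (p : Nat × Nat)
    (hlt : ∀ q ∈ L1, pvVal a q < pvVal a p) (hle : ∀ q ∈ L2, pvVal a q ≤ pvVal a p) :
    ∀ r ∈ L1 ++ p :: L2, pvVal a r ≤ pvVal a p := by
  intro r hr
  rcases List.mem_append.1 hr with h | h
  · exact le_of_lt (hlt r h)
  · rcases List.mem_cons.1 h with h | h
    · subst h; exact le_refl _
    · exact hle r h

lemma pvDecompFirst {R : Nat × Nat → Nat × Nat → Prop} (a : Nat → Int)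
    (L1 L2 : List (Nat × Nat)) (p : Nat × Nat)
    (hpw : (L1 ++ p :: L2).Pairwise R)
    (hlt : ∀ q ∈ L1, pvVal a q < pvVal a p) :
    ∀ r ∈ L1 ++ p :: L2, pvVal a r = pvVal a p → r = p ∨ R p r := by
  intro r hr hv
  rcases List.mem_append.1 hr with h | h
  · exact absurd hv (ne_of_lt (hlt r h))
  · rcases List.mem_cons.1 h with h | h
    · exact Or.inl h
    · exact Or.inr ((List.pairwise_cons.1 (List.pairwise_append.1 hpw).2.1).1 r h)

-- main reordering: fold over the lex order = fold over the j-major order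
lemma pvAF_eq_JF (a : Nat → Int) (n : Nat) :
    (pvAlist n).foldl (pvStep a) (0, 0, 0) = (pvJpre (n - 1)).foldl (pvStep a) (0, 0, 0) := by
  have hmem : ∀ p : Nat × Nat, p ∈ pvAlist n ↔ p ∈ pvJpre (n - 1) := by
    intro p; rw [pvMemA, pvMemJ]; omega
  rcases pvFoldChar a (pvAlist n) (0, 0, 0) with ⟨heA, hallA⟩ | ⟨A1, p, A2, hdA, heA, hgtA, hltA, hleA⟩ <;>
    rcases pvFoldChar a (pvJpre (n - 1)) (0, 0, 0) with ⟨heJ, hallJ⟩ | ⟨J1, q, J2, hdJ, heJ, hgtJ, hltJ, hleJ⟩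
  · rw [heA, heJ]
  · exfalso
    have hq : q ∈ pvJpre (n - 1) := by rw [hdJ]; simp
    have := hallA q ((hmem q).2 hq)
    simp at this; omega
  · exfalso
    have hp : p ∈ pvAlist n := by rw [hdA]; simp
    have := hallJ p ((hmem p).1 hp)
    simp at this; omega
  · -- both folds record a strictly positive maximum pair
    have hp : p ∈ pvAlist n := by rw [hdA]; simp
    have hq : q ∈ pvJpre (n - 1) := by rw [hdJ]; simp
    have hpb := (pvMemA n p).1 hp
    have hqb := (pvMemJ (n - 1) q).1 hq
    have hmaxA : ∀ r ∈ pvAlist n, pvVal a r ≤ pvVal a p := by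
      rw [hdA]; exact pvDecompMax a A1 A2 p hltA hleA
    have hmaxJ : ∀ r ∈ pvJpre (n - 1), pvVal a r ≤ pvVal a q := by
      rw [hdJ]; exact pvDecompMax a J1 J2 q hltJ hleJ
    have hvq : pvVal a q = pvVal a p :=
      le_antisymm (hmaxA q ((hmem q).2 hq)) (hmaxJ p ((hmem p).1 hp))
    have hfirstA : ∀ r ∈ pvAlist n, pvVal a r = pvVal a p → r = p ∨ pvLex p r := by
      rw [hdA]; exact pvDecompFirst a A1 A2 p (hdA ▸ pvPairwiseA n) hltA
    have hfirstJ : ∀ r ∈ pvJpre (n - 1), pvVal a r = pvVal a q → r = q ∨ pvRev q r := by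
      rw [hdJ]; exact pvDecompFirst a J1 J2 q (hdJ ▸ pvPairwiseJ (n - 1)) hltJ
    have hkey : p.1 = q.1 ∧ p.2 = q.2 := by
      apply pvExchange a n p.1 p.2 q.1 q.2 hpb.1 hpb.2 hqb.1 (by omega)
      · intro i j hij hjn
        exact hmaxA (i, j) ((pvMemA n (i, j)).2 ⟨hij, hjn⟩)
      · exact hvq.symm
      · intro i j hij hjn hv
        rcases hfirstA (i, j) ((pvMemA n (i, j)).2 ⟨hij, hjn⟩) hv with h | h
        · exact Or.inr ⟨(congrArg Prod.fst h).symm, le_of_eq (congrArg Prod.snd h).symm⟩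
        · rcases h with h | ⟨h1, h2⟩
          · exact Or.inl h
          · exact Or.inr ⟨h1, le_of_lt h2⟩
      · intro i j hij hjn hv
        rcases hfirstJ (i, j) ((hmem (i, j)).1 ((pvMemA n (i, j)).2 ⟨hij, hjn⟩))
            (by simp [pvVal] at hvq ⊢; omega) with h | h
        · exact Or.inr ⟨(congrArg Prod.snd h).symm, le_of_eq (congrArg Prod.fst h).symm⟩
        · rcases h with h | ⟨h1, h2⟩
          · exact Or.inl h
          · exact Or.inr ⟨h1, le_of_lt h2⟩
    rw [heA, heJ, hvq, hkey.1, hkey.2]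

-- inner loop collapse: folding the pairs (0,j) … (k-1,j) is one prefix-max test
lemma pvInner (a : Nat → Int) (j : Nat) :
    ∀ k, 1 ≤ k → ∀ st : Int × Int × Int,
      (((List.range k).map (fun i => (i, j))).foldl (pvStep a) st) =
        if pvPM a k + a j > st.1 then (pvPM a k + a j, (pvFI a k : Int), (j : Int)) else st := by
  intro k
  induction k with
  | zero => omega
  | succ k ih =>
    intro _ st
    by_cases hk : 1 ≤ k
    · rw [List.range_succ, List.map_append, List.foldl_append, ih hk st]
      simp only [List.map_cons, List.map_nil, List.foldl_cons, List.foldl_nil, pvStep, pvVal,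
        pvPM, pvFI]
      split_ifs <;> simp_all
      all_goals exfalso; omega
    · have hk0 : k = 0 := by omega
      subst hk0
      simp only [List.range_succ, List.range_zero, List.nil_append, List.map_cons, List.map_nil,
        List.foldl_cons, List.foldl_nil, pvStep, pvVal, pvPM, pvFI]
      split_ifs <;> simp_all

-- B's loop invariant: after j = 1 … k the state holds the j-major fold and the prefix max/index
lemma pvBInv (a : Nat → Int) (k : Nat) :
    (List.range k).foldl (fun st m => pvBStep a st (1 + m)) (0, 0, 0, a 0, 0) =
      (((pvJpre k).foldl (pvStep a) (0, 0, 0)).2.1,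
       ((pvJpre k).foldl (pvStep a) (0, 0, 0)).2.2,
       ((pvJpre k).foldl (pvStep a) (0, 0, 0)).1,
       pvPM a (k + 1), (pvFI a (k + 1) : Int)) := by
  induction k with
  | zero => simp [pvJpre, pvPM, pvFI]
  | succ k ih =>
    rw [List.range_succ, List.foldl_append, List.foldl_cons, List.foldl_nil, ih]
    have hJ : pvJpre (k + 1) = pvJpre k ++ (List.range (k + 1)).map (fun i => (i, k + 1)) := by
      simp [pvJpre, List.range_succ]
    rw [hJ, List.foldl_append, pvInner a (k + 1) (k + 1) (by omega)]
    have h1k : 1 + k = k + 1 := by omega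
    simp only [pvBStep, h1k, pvPM, pvFI]
    split_ifs <;> simp_all

lemma pvPortA (arr : List Int) :
    find_max_sum_indices arr =
      (((pvAlist arr.length).foldl (pvStep (fun i => arr.getD i 0)) (0, 0, 0)).2.1,
       ((pvAlist arr.length).foldl (pvStep (fun i => arr.getD i 0)) (0, 0, 0)).2.2,
       ((pvAlist arr.length).foldl (pvStep (fun i => arr.getD i 0)) (0, 0, 0)).1) := by
  have key :
      (PySem.List.pyRange 0 ((arr.length : Int) - 1) 1).foldl (fun st i =>
        (PySem.List.pyRange (i + 1) (arr.length : Int) 1).foldl (fun st j =>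
          let current_sum := PySem.List.pyGetD arr i 0 + PySem.List.pyGetD arr j 0
          if current_sum > st.1 then (current_sum, i, j) else st) st)
        ((0 : Int), (0 : Int), (0 : Int)) =
      (pvAlist arr.length).foldl (pvStep (fun i => arr.getD i 0)) (0, 0, 0) := by
    unfold pvAlist
    rw [pvFoldlFlatMap, PySem.List.pyRange_one, List.foldl_map]
    have hlen : (((arr.length : Int) - 1) - 0).toNat = arr.length - 1 := by omega
    rw [hlen]
    apply PySem.List.foldl_congr_mem
    intro st k _
    have e0 : (0 : Int) + (k : Int) = ((k : Nat) : Int) := by ring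
    rw [e0, PySem.List.pyRange_one, List.foldl_map]
    have hN : (((arr.length : Int)) - ((k : Int) + 1)).toNat = arr.length - 1 - k := by omega
    rw [hN, List.foldl_map]
    apply PySem.List.foldl_congr_mem
    intro st m _
    have e1 : (k : Int) + 1 + (m : Int) = ((k + 1 + m : Nat) : Int) := by push_cast; ring
    rw [e1]
    simp only [PySem.List.pyGetD_natCast, pvStep, pvVal]
  simp only [find_max_sum_indices]
  rw [key]

lemma pvPortB (arr : List Int) :
    find_max_sum_indices_alt arr =
      (((pvJpre (arr.length - 1)).foldl (pvStep (fun i => arr.getD i 0)) (0, 0, 0)).2.1,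
       ((pvJpre (arr.length - 1)).foldl (pvStep (fun i => arr.getD i 0)) (0, 0, 0)).2.2,
       ((pvJpre (arr.length - 1)).foldl (pvStep (fun i => arr.getD i 0)) (0, 0, 0)).1) := by
  match arr with
  | [] => simp [find_max_sum_indices_alt, pvJpre]
  | a0 :: t =>
    have key :
        (PySem.List.pyRange 1 (((a0 :: t).length : Int)) 1).foldl (fun st j =>
          let aj := PySem.List.pyGetD (a0 :: t) j 0
          let s := st.2.2.2.1 + aj
          let st1 := if s > st.2.2.1 then (st.2.2.2.2, j, s, st.2.2.2.1, st.2.2.2.2) else st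
          if aj > st1.2.2.2.1 then (st1.1, st1.2.1, st1.2.2.1, aj, j) else st1)
          ((0 : Int), (0 : Int), (0 : Int), a0, (0 : Int)) =
        (List.range ((a0 :: t).length - 1)).foldl
          (fun st m => pvBStep (fun i => (a0 :: t).getD i 0) st (1 + m)) (0, 0, 0, a0, 0) := by
      rw [PySem.List.pyRange_one, List.foldl_map]
      have hlen : ((((a0 :: t).length : Int)) - 1).toNat = (a0 :: t).length - 1 := by
        omega
      rw [hlen]
      apply PySem.List.foldl_congr_mem
      intro st k _
      have e1 : (1 : Int) + (k : Int) = ((1 + k : Nat) : Int) := by push_cast; ring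
      rw [e1]
      simp only [PySem.List.pyGetD_natCast, pvBStep]
    simp only [find_max_sum_indices_alt]
    rw [key,
      show ((0:Int),(0:Int),(0:Int),a0,(0:Int)) =
        ((0:Int),(0:Int),(0:Int),(fun i => (a0 :: t).getD i 0) 0,(0:Int)) from rfl,
      pvBInv (fun i => (a0 :: t).getD i 0) ((a0 :: t).length - 1)]

-- ===== VERDICT (by name: the statement is the Claim_ definition above) =====
theorem find_max_sum_indices_spec : Claim_equal_find_max_sum_indices := by
  intro arr _
  unfold Spec_find_max_sum_indices
  rw [pvPortA, pvPortB, pvAF_eq_JF]
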